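-- pv_equiv track=rewrite | github.com/taoyds/grappa | weak_sup/wikisql_roberta/sempar/domain_languages/wikisql_language.py | _get_slot_productions
-- ===== SOURCE A (Python) =====
-- from collections import defaultdict
-- from typing import Dict, List, NamedTuple, Set, Tuple
--
-- def _get_slot_productions(actions: Dict) -> Dict:
--     """
--     filling slots of sketches
--     """
--     new_action_dic = defaultdict(list)
--     pruned = []
--     for non_terminal, productions in actions.items():
--         if non_terminal in ["Column", "StringColumn", "NumberColumn", "str", "Date"]:
--             new_action_dic[non_terminal] = actions[non_terminal]
--         elif non_terminal in  ["Number"]: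
--             new_prod_list = []
--             for prod in actions[non_terminal]:
--                 _, rhs = prod.split(" -> ")
--                 try: # if this is a terminal
--                     float(rhs)
--                     new_prod_list.append(prod)
--                 except:
--                     pass
--             new_action_dic[non_terminal] = new_prod_list
--         elif non_terminal == "List[Row]":
--             new_action_dic[non_terminal] = actions[non_terminal][:]
--
--             for prod in new_action_dic[non_terminal]:
--                _, rhs = prod.split(" -> ")
--                _t = rhs[1:-1].split(", ")[0]
--                if _t in actions:
--                    new_action_dic[_t] = actions[_t][:]
--     return new_action_dic
-- ===== SOURCE B (Python) =====
-- from collections import defaultdict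
--
-- _WHITELIST = ("Column", "StringColumn", "NumberColumn", "str", "Date")
--
--
-- def _floatable(text):
--     try:
--         float(text)
--         return True
--     except Exception:
--         return False
--
--
-- def _dep_key(prod):
--     rhs = prod.split(" -> ")[1]
--     return rhs[1:-1].split(", ")[0]
--
--
-- def _get_slot_productions(actions):
--     # Stage 1: compute the output keys, in first-appearance order (dep keys of
--     # "List[Row]" productions are spliced in at the "List[Row]" position).
--     wanted = []
--     for nt in actions:
--         if nt in _WHITELIST or nt == "Number":
--             if nt not in wanted:
--                 wanted.append(nt)
--         elif nt == "List[Row]":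
--             wanted.append(nt)
--             for prod in actions[nt]:
--                 t = _dep_key(prod)
--                 if t in actions and t not in wanted:
--                     wanted.append(t)
--     # Stage 2: compute each key's value (Number is always the float-filtered list).
--     out = defaultdict(list)
--     for nt in wanted:
--         if nt == "Number":
--             out[nt] = [p for p in actions[nt] if _floatable(p.split(" -> ")[1])]
--         else:
--             out[nt] = actions[nt][:]
--     return out
-- ===== Notes on version B (the rewrite author's own statement) =====
-- stated objective: alternative
-- what changed: A classifies keys in one pass while mutating a defaultdict (with the List[Row] dependency loop inserting copies mid-iteration); B decouples order from values: a first pass computes the output-key order (dependency keys spliced in at the List[Row] position, deduplicated), then a second pass computes each key's final value, always float-filtering Number.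
-- intended difference: On inputs where the Number key precedes List[Row], some List[Row] production references Number and some Number production has a non-float rhs, A returns the raw Number list (the dependency copy overwrites the filtered one) while B returns the float-filtered list, which is the intended terminal-only slot list. — e.g. on _get_slot_productions([("Number", ["Number -> 10", "Number -> x"]), ("List[Row]", ["List[Row] -> (Number)"])]): A returns [("Number", ["Number -> 10", "Number -> x"]), ("List[Row]", ["List[Row] -> (Number)"])], B returns [("Number", ["Number -> 10"]), ("List[Row]", ["List[Row] -> (Number)"])]
import Mathlib
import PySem

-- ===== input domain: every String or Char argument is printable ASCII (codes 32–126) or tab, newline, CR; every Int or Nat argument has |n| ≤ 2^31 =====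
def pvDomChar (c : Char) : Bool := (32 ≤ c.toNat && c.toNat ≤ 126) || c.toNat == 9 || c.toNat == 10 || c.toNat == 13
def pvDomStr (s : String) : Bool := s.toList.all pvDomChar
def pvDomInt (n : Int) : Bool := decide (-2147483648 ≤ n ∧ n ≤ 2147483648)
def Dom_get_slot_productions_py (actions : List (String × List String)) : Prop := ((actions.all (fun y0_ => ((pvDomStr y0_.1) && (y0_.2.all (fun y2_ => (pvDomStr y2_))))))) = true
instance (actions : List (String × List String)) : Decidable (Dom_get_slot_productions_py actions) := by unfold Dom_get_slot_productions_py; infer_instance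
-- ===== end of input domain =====

-- B replaces A's mutate-a-dict-while-classifying loop by two staged passes (first the output key
-- order, then each key's final value); objective: alternative decomposition, same cost. B always
-- float-filters "Number" (A's dependency copy can overwrite the filtered list — stated as D_ below).

-- ---- shared hand-written primitive: success of Python's float(str) (no PySem primitive exists).
-- Exact on the ASCII domain: strip whitespace, optional sign, then "inf"/"infinity"/"nan"
-- (case-insensitive) or digit groups with single underscores between digits, optional '.',
-- optional exponent; validated against CPython by exhaustive fuzzing.
def pvDigit (c : Char) : Bool := '0' ≤ c && c ≤ '9'

def pvGroupTail : List Char → Bool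
  | [] => true
  | '_' :: d :: r => pvDigit d && pvGroupTail r
  | '_' :: [] => false
  | c :: r => pvDigit c && pvGroupTail r

def pvGroup : List Char → Bool
  | [] => false
  | c :: r => pvDigit c && pvGroupTail r

def pvMant (cs : List Char) : Bool :=
  if '.' ∈ cs then
    let a := cs.takeWhile (fun c => c ≠ '.')
    let b := (cs.dropWhile (fun c => c ≠ '.')).tail
    if a = [] then pvGroup b
    else if b = [] then pvGroup a
    else pvGroup a && pvGroup b
  else pvGroup cs

def pvIsE (c : Char) : Bool := c = 'e' || c = 'E'

def pvDropSign (cs : List Char) : List Char :=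
  match cs with
  | c :: r => if c = '+' || c = '-' then r else c :: r
  | [] => []

def pvNumBody (cs : List Char) : Bool :=
  if cs.any pvIsE then
    let m := cs.takeWhile (fun c => !pvIsE c)
    let e := (cs.dropWhile (fun c => !pvIsE c)).tail
    pvMant m && pvGroup (pvDropSign e)
  else pvMant cs

def pvFloatOk (s : String) : Bool :=
  let t := pvDropSign (PySem.Str.strip s).toList
  let low := PySem.Chars.lower t
  if low = "inf".toList || low = "infinity".toList || low = "nan".toList then true
  else pvNumBody t

-- neutral helpers, used by both ports (and by Pre_/D_/Raises_):
-- rhs of "lhs -> rhs"  (Python: _, rhs = prod.split(" -> ") resp. prod.split(" -> ")[1])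
def slotRhs (prod : String) : String :=
  ((PySem.Str.split? prod " -> ").getD []).getD 1 ""
-- _t = rhs[1:-1].split(", ")[0]
def slotDepKey (prod : String) : String :=
  ((PySem.Str.split? (PySem.Str.slice (slotRhs prod) (some 1) (some (-1))) ", ").getD []).getD 0 ""

-- ===== PORT A =====
def get_slot_productions_py (actions : List (String × List String)) : List (String × List String) :=
  let d := PySem.Dict.ofList actions
  (d.items.foldl (fun (acc : PySem.Dict String (List String)) (pr : String × List String) =>
      let nt := pr.1
      if nt ∈ (["Column", "StringColumn", "NumberColumn", "str", "Date"] : List String) then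
        acc.insert nt (d.getD nt [])
      else if nt ∈ (["Number"] : List String) then
        let newProdList := (d.getD nt []).foldl (fun (np : List String) (prod : String) =>
            if pvFloatOk (slotRhs prod) then np ++ [prod] else np) []
        acc.insert nt newProdList
      else if nt = "List[Row]" then
        let copied := d.getD nt []
        let acc1 := acc.insert nt copied
        copied.foldl (fun (acc2 : PySem.Dict String (List String)) (prod : String) =>
            let t := slotDepKey prod
            if d.contains t then acc2.insert t (d.getD t []) else acc2) acc1
      else acc) PySem.Dict.empty).items

-- ===== PORT B =====
def slotWhitelist : List String := ["Column", "StringColumn", "NumberColumn", "str", "Date"]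

-- Stage 1: output keys in first-appearance order (deps spliced in at "List[Row]")
def slotWanted (d : PySem.Dict String (List String)) : List String :=
  d.keys.foldl (fun (w : List String) (nt : String) =>
      if nt ∈ slotWhitelist ∨ nt = "Number" then
        (if nt ∈ w then w else w ++ [nt])
      else if nt = "List[Row]" then
        (d.getD nt []).foldl (fun (w2 : List String) (prod : String) =>
            let t := slotDepKey prod
            if d.contains t ∧ t ∉ w2 then w2 ++ [t] else w2) (w ++ [nt])
      else w) []

def get_slot_productions_py_alt (actions : List (String × List String)) : List (String × List String) :=
  let d := PySem.Dict.ofList actions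
  -- Stage 2: each key's value ("Number" is always the float-filtered list)
  ((slotWanted d).foldl (fun (out : PySem.Dict String (List String)) (nt : String) =>
      if nt = "Number" then
        out.insert nt ((d.getD nt []).filter (fun p => pvFloatOk (slotRhs p)))
      else out.insert nt (d.getD nt [])) PySem.Dict.empty).items

-- ===== PRECONDITION & SPEC =====
-- Pre_ excludes exactly the inputs where Python A raises: a production under the "Number" or
-- "List[Row]" key that does not split into exactly two pieces on " -> " (ValueError on unpacking).
def Pre_get_slot_productions_py (actions : List (String × List String)) : Prop :=
  (∀ p ∈ (PySem.Dict.ofList actions).getD "Number" [],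
      ((PySem.Str.split? p " -> ").getD []).length = 2) ∧
  (∀ p ∈ (PySem.Dict.ofList actions).getD "List[Row]" [],
      ((PySem.Str.split? p " -> ").getD []).length = 2)
instance (actions : List (String × List String)) : Decidable (Pre_get_slot_productions_py actions) := by
  unfold Pre_get_slot_productions_py; infer_instance

def pvWitness_get_slot_productions_py : (List (String × List String)) :=
  [("Number", ["Number -> 10", "Number -> first_number"]), ("Column", ["Column -> column:Points"])]

-- On inputs whose "Number" key precedes "List[Row]", some "List[Row]" production references
-- "Number", and some "Number" production has a non-float rhs, A returns the RAW "Number" list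
-- (the dependency copy overwrites the filtered one), while B returns the float-filtered list,
-- which is the intended terminal-only slot list.
def D_get_slot_productions_py (actions : List (String × List String)) : Prop :=
  (PySem.Dict.ofList actions).contains "Number" = true ∧
  (PySem.Dict.ofList actions).contains "List[Row]" = true ∧
  (PySem.Dict.ofList actions).keys.idxOf "Number" < (PySem.Dict.ofList actions).keys.idxOf "List[Row]" ∧
  (∃ p ∈ (PySem.Dict.ofList actions).getD "List[Row]" [], slotDepKey p = "Number") ∧
  (∃ p ∈ (PySem.Dict.ofList actions).getD "Number" [], pvFloatOk (slotRhs p) = false)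
instance (actions : List (String × List String)) : Decidable (D_get_slot_productions_py actions) := by
  unfold D_get_slot_productions_py; infer_instance

def Spec_get_slot_productions_py (actions : List (String × List String)) (out : List (String × List String)) : Prop := ¬ D_get_slot_productions_py actions → out = get_slot_productions_py_alt actions
instance (actions : List (String × List String)) (out : List (String × List String)) : Decidable (Spec_get_slot_productions_py actions out) := by unfold Spec_get_slot_productions_py; infer_instance

def pvDiffWitness_get_slot_productions_py : (List (String × List String)) :=
  [("Number", ["Number -> 10", "Number -> x"]), ("List[Row]", ["List[Row] -> (Number)"])]
def pvDiffWitnessOut_get_slot_productions_py : (List (String × List String)) × (List (String × List String)) :=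
  ([("Number", ["Number -> 10", "Number -> x"]), ("List[Row]", ["List[Row] -> (Number)"])],
   [("Number", ["Number -> 10"]), ("List[Row]", ["List[Row] -> (Number)"])])

-- ===== CLAIM (what is proved, stated in full; the proofs are below) =====
def Claim_unchanged_get_slot_productions_py : Prop := ∀ (actions : List (String × List String)), Dom_get_slot_productions_py actions → Pre_get_slot_productions_py actions → Spec_get_slot_productions_py actions (get_slot_productions_py actions)
def Claim_changed_get_slot_productions_py : Prop := Dom_get_slot_productions_py (pvDiffWitness_get_slot_productions_py) ∧ Pre_get_slot_productions_py (pvDiffWitness_get_slot_productions_py) ∧ D_get_slot_productions_py (pvDiffWitness_get_slot_productions_py) ∧ get_slot_productions_py (pvDiffWitness_get_slot_productions_py) = pvDiffWitnessOut_get_slot_productions_py.1 ∧ get_slot_productions_py_alt (pvDiffWitness_get_slot_productions_py) = pvDiffWitnessOut_get_slot_productions_py.2 ∧ pvDiffWitnessOut_get_slot_productions_py.1 ≠ pvDiffWitnessOut_get_slot_productions_py.2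

def Claim_exact_get_slot_productions_py : Prop := ∀ (actions : List (String × List String)), Dom_get_slot_productions_py actions → Pre_get_slot_productions_py actions → D_get_slot_productions_py actions → get_slot_productions_py actions ≠ get_slot_productions_py_alt actions

-- ===== LEMMAS AND PROOFS =====

-- A's loop body, zeta-reduced (definitionally equal to the lambda in port A)
def pvAStep (d acc : PySem.Dict String (List String)) (pr : String × List String) :
    PySem.Dict String (List String) :=
  if pr.1 ∈ (["Column", "StringColumn", "NumberColumn", "str", "Date"] : List String) then
    acc.insert pr.1 (d.getD pr.1 [])
  else if pr.1 ∈ (["Number"] : List String) then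
    acc.insert pr.1 ((d.getD pr.1 []).foldl (fun np prod =>
      if pvFloatOk (slotRhs prod) then np ++ [prod] else np) [])
  else if pr.1 = "List[Row]" then
    (d.getD pr.1 []).foldl (fun acc2 prod =>
        if d.contains (slotDepKey prod) then
          acc2.insert (slotDepKey prod) (d.getD (slotDepKey prod) []) else acc2)
      (acc.insert pr.1 (d.getD pr.1 []))
  else acc

-- B's wanted-building step, as a fold over d.items (slotWanted folds over d.keys)
def pvWStep (d : PySem.Dict String (List String)) (w : List String) (pr : String × List String) :
    List String :=
  if pr.1 ∈ (["Column", "StringColumn", "NumberColumn", "str", "Date"] : List String) ∨ pr.1 = "Number" then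
    (if pr.1 ∈ w then w else w ++ [pr.1])
  else if pr.1 = "List[Row]" then
    (d.getD pr.1 []).foldl (fun w2 prod =>
        if d.contains (slotDepKey prod) ∧ slotDepKey prod ∉ w2 then w2 ++ [slotDepKey prod] else w2)
      (w ++ [pr.1])
  else w

def pvNumF (d : PySem.Dict String (List String)) : List String :=
  (d.getD "Number" []).filter (fun p => pvFloatOk (slotRhs p))

def pvVal (d : PySem.Dict String (List String)) (k : String) : List String :=
  if k = "Number" then pvNumF d else d.getD k []

-- the value a key holds mid-loop: raw while "Number"'s own key is still unprocessed
def pvVV (d : PySem.Dict String (List String)) (rest : List String) (k : String) : List String :=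
  if k = "Number" ∧ "Number" ∈ rest then d.getD "Number" [] else pvVal d k

-- keys of a dict whose items were characterised as a map over w
theorem pv_keys_of_items {acc : PySem.Dict String (List String)} {w : List String}
    {f : String → List String} (h : acc.items = w.map (fun k => (k, f k))) : acc.keys = w := by
  show acc.items.map Prod.fst = w
  rw [h, List.map_map]
  exact List.map_id w

-- inserting a pair the dict already holds (unique keys) changes nothing
theorem pv_insert_of_mem_items {κ ν : Type} [BEq κ] [LawfulBEq κ] (d : PySem.Dict κ ν)
    {k : κ} {v : ν} (hnd : d.keys.Nodup) (hm : (k, v) ∈ d.items) : d.insert k v = d := by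
  have hc : d.contains k = true :=
    (PySem.Dict.contains_iff_mem_keys d k).2 (PySem.Dict.mem_keys_of_mem_items d hm)
  apply PySem.Dict.ext
  rw [PySem.Dict.items_insert_of_contains d v hc]
  have h : ∀ p ∈ d.items, (if (p.1 == k) = true then (k, v) else p) = p := by
    intro p hp
    by_cases hpk : (p.1 == k) = true
    · have hp1 : p.1 = k := eq_of_beq hpk
      have h1 : d.get? p.1 = some p.2 := PySem.Dict.get?_of_mem_items d (by simpa using hp) hnd
      have h2 : d.get? k = some v := PySem.Dict.get?_of_mem_items d hm hnd
      rw [hp1, h2] at h1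
      have h3 : v = p.2 := by injection h1
      simp only [hpk, if_true]
      rw [← hp1, h3]
    · simp [hpk]
  calc List.map (fun p => if (p.1 == k) = true then (k, v) else p) d.items
      = List.map id d.items := List.map_congr_left h
    _ = d.items := List.map_id d.items

theorem pvVV_nil (d : PySem.Dict String (List String)) : pvVV d [] = pvVal d := by
  funext k; simp [pvVV]

theorem pvVV_cons_ne (d : PySem.Dict String (List String)) {x : String} (h : x ≠ "Number")
    (r : List String) : pvVV d (x :: r) = pvVV d r := by
  funext k
  have hx : ¬("Number" = x) := fun he => h he.symm
  simp [pvVV, List.mem_cons, hx]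

theorem pv_wl_ne : ∀ x ∈ (["Column", "StringColumn", "NumberColumn", "str", "Date"] : List String),
    x ≠ "Number" ∧ x ≠ "List[Row]" := by decide

-- the dependency loop of A tracked against the dependency splice of B
theorem pv_dep (d : PySem.Dict String (List String)) (tks : List String)
    (hNumEq : d.contains "Number" = true →
      (∃ q ∈ d.getD "List[Row]" [], slotDepKey q = "Number") →
      "Number" ∉ tks → pvNumF d = d.getD "Number" []) :
    ∀ (ps : List String), (∀ p ∈ ps, p ∈ d.getD "List[Row]" []) →
    ∀ (acc2 : PySem.Dict String (List String)) (w2 : List String),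
      acc2.items = w2.map (fun k => (k, pvVV d tks k)) → w2.Nodup →
      ("Number" ∉ w2 → d.contains "Number" = true → "Number" ∈ tks) →
      (ps.foldl (fun acc2 prod =>
          if d.contains (slotDepKey prod) then
            acc2.insert (slotDepKey prod) (d.getD (slotDepKey prod) []) else acc2) acc2).items
        = (ps.foldl (fun w2 prod =>
            if d.contains (slotDepKey prod) ∧ slotDepKey prod ∉ w2 then w2 ++ [slotDepKey prod]
            else w2) w2).map (fun k => (k, pvVV d tks k))
      ∧ (ps.foldl (fun w2 prod =>
            if d.contains (slotDepKey prod) ∧ slotDepKey prod ∉ w2 then w2 ++ [slotDepKey prod]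
            else w2) w2).Nodup
      ∧ w2 ⊆ ps.foldl (fun w2 prod =>
            if d.contains (slotDepKey prod) ∧ slotDepKey prod ∉ w2 then w2 ++ [slotDepKey prod]
            else w2) w2 := by
  intro ps
  induction ps with
  | nil => intro _ acc2 w2 hi hw _; exact ⟨hi, hw, fun a ha => ha⟩
  | cons p ps ih =>
    intro hps acc2 w2 hi hw hnw
    rw [List.foldl_cons, List.foldl_cons]
    have hkacc : acc2.keys = w2 := pv_keys_of_items hi
    have hndacc : acc2.keys.Nodup := by rw [hkacc]; exact hw
    by_cases hc : d.contains (slotDepKey p) = true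
    · by_cases hm : slotDepKey p ∈ w2
      · -- overwrite with an identical value
        have hval : pvVV d tks (slotDepKey p) = d.getD (slotDepKey p) [] := by
          by_cases hN : slotDepKey p = "Number"
          · by_cases hNt : "Number" ∈ tks
            · rw [hN]; simp [pvVV, hNt]
            · have heq := hNumEq (hN ▸ hc) ⟨p, hps p (by simp), hN⟩ hNt
              rw [hN]; simp only [pvVV, hNt, and_false, if_false, pvVal, if_pos]
              exact heq
          · simp [pvVV, pvVal, hN]
        have hmem : (slotDepKey p, d.getD (slotDepKey p) []) ∈ acc2.items := by
          rw [hi]; exact List.mem_map.2 ⟨slotDepKey p, hm, by rw [hval]⟩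
        rw [if_pos hc, pv_insert_of_mem_items acc2 hndacc hmem, if_neg (fun hh => hh.2 hm)]
        exact ih (fun q hq => hps q (by simp [hq])) acc2 w2 hi hw hnw
      · -- fresh key appended
        have hcf : acc2.contains (slotDepKey p) = false := by
          rcases Bool.eq_false_or_eq_true (acc2.contains (slotDepKey p)) with h | h
          · exact absurd (hkacc ▸ (PySem.Dict.contains_iff_mem_keys acc2 (slotDepKey p)).1 h) hm
          · exact h
        have hval : pvVV d tks (slotDepKey p) = d.getD (slotDepKey p) [] := by
          by_cases hN : slotDepKey p = "Number"
          · have hNt : "Number" ∈ tks := hnw (hN ▸ hm) (hN ▸ hc)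
            rw [hN]; simp [pvVV, hNt]
          · simp [pvVV, pvVal, hN]
        rw [if_pos hc, if_pos ⟨hc, hm⟩]
        have hi2 : (acc2.insert (slotDepKey p) (d.getD (slotDepKey p) [])).items
            = (w2 ++ [slotDepKey p]).map (fun k => (k, pvVV d tks k)) := by
          rw [PySem.Dict.items_insert_of_not_contains acc2 _ hcf, hi, List.map_append]
          simp [hval]
        have hw2 : (w2 ++ [slotDepKey p]).Nodup := by
          simp only [List.nodup_append]
          refine ⟨hw, List.nodup_singleton _, ?_⟩
          intro a ha b hb hab; rw [List.mem_singleton] at hb; exact hm ((hab.trans hb) ▸ ha)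
        have hnw2 : "Number" ∉ w2 ++ [slotDepKey p] → d.contains "Number" = true →
            "Number" ∈ tks := fun h => hnw (fun hh => h (by simp [hh]))
        obtain ⟨h1, h2, h3⟩ := ih (fun q hq => hps q (by simp [hq])) _ _ hi2 hw2 hnw2
        exact ⟨h1, h2, fun a ha => h3 (by simp [ha])⟩
    · rw [if_neg hc, if_neg (fun hh => hc hh.1)]
      exact ih (fun q hq => hps q (by simp [hq])) acc2 w2 hi hw hnw

-- A's classifying loop tracked against B's wanted-then-values construction
theorem pv_outer (d : PySem.Dict String (List String)) (hnd : d.keys.Nodup)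
    (hD : d.contains "Number" = true → d.contains "List[Row]" = true →
      d.keys.idxOf "Number" < d.keys.idxOf "List[Row]" →
      (∃ p ∈ d.getD "List[Row]" [], slotDepKey p = "Number") →
      ∀ p ∈ d.getD "Number" [], pvFloatOk (slotRhs p) = true) :
    ∀ (l pre : List (String × List String)) (acc : PySem.Dict String (List String))
      (w : List String),
      pre ++ l = d.items →
      acc.items = w.map (fun k => (k, pvVV d (l.map Prod.fst) k)) →
      w.Nodup →
      ("List[Row]" ∈ w → "List[Row]" ∈ pre.map Prod.fst) →
      ("Number" ∈ pre.map Prod.fst → "Number" ∈ w) →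
      (l.foldl (pvAStep d) acc).items
        = (l.foldl (pvWStep d) w).map (fun k => (k, pvVal d k))
      ∧ (l.foldl (pvWStep d) w).Nodup := by
  intro l
  induction l with
  | nil =>
    intro pre acc w _ hi hw _ _
    rw [List.foldl_nil, List.foldl_nil, hi]
    exact ⟨by simp only [List.map_nil, pvVV_nil], hw⟩
  | cons pr t ih =>
    intro pre acc w hsplit hi hw hLRw hNw
    have hmemd : pr ∈ d.items := by rw [← hsplit]; simp
    have hkeys : d.keys = pre.map Prod.fst ++ pr.1 :: t.map Prod.fst := by
      show d.items.map Prod.fst = _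
      rw [← hsplit]; simp
    have hndk := hnd
    rw [hkeys, List.nodup_append] at hndk
    have hpr_pre : pr.1 ∉ pre.map Prod.fst := fun h => hndk.2.2 pr.1 h pr.1 (by simp) rfl
    have hpr_t : pr.1 ∉ t.map Prod.fst := (List.nodup_cons.mp hndk.2.1).1
    have hgetD : d.getD pr.1 [] = pr.2 := by
      have h : (pr.1, pr.2) ∈ d.items := by simpa using hmemd
      exact PySem.Dict.getD_of_mem_items d h hnd []
    have hkacc : acc.keys = w := pv_keys_of_items hi
    rw [List.foldl_cons, List.foldl_cons]
    by_cases h1 : pr.1 ∈ (["Column", "StringColumn", "NumberColumn", "str", "Date"] : List String)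
    · obtain ⟨hneN, hneL⟩ := pv_wl_ne pr.1 h1
      have hvvt : pvVV d ((pr :: t).map Prod.fst) = pvVV d (t.map Prod.fst) := by
        simp only [List.map_cons]; exact pvVV_cons_ne d hneN _
      have hstepW : pvWStep d w pr = (if pr.1 ∈ w then w else w ++ [pr.1]) := by
        rw [pvWStep, if_pos (Or.inl h1)]
      by_cases hm : pr.1 ∈ w
      · have hstepA : pvAStep d acc pr = acc := by
          rw [pvAStep, if_pos h1]
          have hmem : (pr.1, d.getD pr.1 []) ∈ acc.items := by
            rw [hi]
            exact List.mem_map.2 ⟨pr.1, hm, by simp [pvVV, pvVal, hneN]⟩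
          exact pv_insert_of_mem_items acc (hkacc ▸ hw) hmem
        rw [hstepA, hstepW, if_pos hm]
        refine ih (pre ++ [pr]) acc w (by rw [← hsplit]; simp) (by rw [hi, hvvt]) hw
          (fun h => by simp [hLRw h]) (fun h => ?_)
        simp only [List.map_append, List.mem_append, List.map_cons, List.map_nil,
          List.mem_singleton] at h
        rcases h with h | h
        · exact hNw h
        · exact absurd h.symm hneN
      · have hcf : acc.contains pr.1 = false := by
          rcases Bool.eq_false_or_eq_true (acc.contains pr.1) with h | h
          · exact absurd (hkacc ▸ (PySem.Dict.contains_iff_mem_keys acc pr.1).1 h) hm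
          · exact h
        have hstepA : pvAStep d acc pr = acc.insert pr.1 (d.getD pr.1 []) := by
          rw [pvAStep, if_pos h1]
        rw [hstepA, hstepW, if_neg hm]
        refine ih (pre ++ [pr]) _ (w ++ [pr.1]) (by rw [← hsplit]; simp) ?_
          (by simp only [List.nodup_append]; refine ⟨hw, List.nodup_singleton _, ?_⟩; intro a ha b hb hab; rw [List.mem_singleton] at hb; exact hm ((hab.trans hb) ▸ ha)) (fun h => ?_) (fun h => ?_)
        · rw [PySem.Dict.items_insert_of_not_contains acc _ hcf, hi, hvvt, List.map_append]
          simp [pvVV, pvVal, hneN]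
        · simp only [List.mem_append, List.mem_singleton] at h
          rcases h with h | h
          · simp [hLRw h]
          · exact absurd h.symm hneL
        · simp only [List.map_append, List.mem_append, List.map_cons, List.map_nil,
            List.mem_singleton] at h
          rcases h with h | h
          · exact List.mem_append_left _ (hNw h)
          · exact absurd h.symm hneN
    · by_cases h2 : pr.1 = "Number"
      · have hNt : "Number" ∉ t.map Prod.fst := h2 ▸ hpr_t
        have hfilter : (d.getD pr.1 []).foldl (fun np prod =>
            if pvFloatOk (slotRhs prod) then np ++ [prod] else np) [] = pvNumF d := by
          rw [h2]
          simpa [pvNumF] using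
            PySem.List.foldl_append_if (fun prod => pvFloatOk (slotRhs prod)) id
              (d.getD "Number" []) []
        have hstepA : pvAStep d acc pr = acc.insert pr.1 (pvNumF d) := by
          rw [pvAStep, if_neg h1, if_pos (by simp [h2]), hfilter]
        have hstepW : pvWStep d w pr = (if pr.1 ∈ w then w else w ++ [pr.1]) := by
          rw [pvWStep, if_pos (Or.inr h2)]
        by_cases hm : pr.1 ∈ w
        · have hcT : acc.contains pr.1 = true :=
            (PySem.Dict.contains_iff_mem_keys acc pr.1).2 (hkacc ▸ hm)
          have hi2 : (acc.insert pr.1 (pvNumF d)).items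
              = w.map (fun k => (k, pvVV d (t.map Prod.fst) k)) := by
            rw [PySem.Dict.items_insert_of_contains acc _ hcT, hi, List.map_map]
            apply List.map_congr_left
            intro k _
            by_cases hkN : k = pr.1
            · simp [Function.comp, hkN, h2, pvVV, pvVal, hNt]
            · have hkN2 : k ≠ "Number" := h2 ▸ hkN
              simp [Function.comp, hkN, pvVV, pvVal, hkN2]
          rw [hstepA, hstepW, if_pos hm]
          refine ih (pre ++ [pr]) _ w (by rw [← hsplit]; simp) hi2 hw
            (fun h => by simp [hLRw h]) (fun h => ?_)
          simp only [List.map_append, List.mem_append, List.map_cons, List.map_nil,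
            List.mem_singleton] at h
          rcases h with h | h
          · exact hNw h
          · exact h2 ▸ (h ▸ hm)
        · have hcf : acc.contains pr.1 = false := by
            rcases Bool.eq_false_or_eq_true (acc.contains pr.1) with h | h
            · exact absurd (hkacc ▸ (PySem.Dict.contains_iff_mem_keys acc pr.1).1 h) hm
            · exact h
          have hi2 : (acc.insert pr.1 (pvNumF d)).items
              = (w ++ [pr.1]).map (fun k => (k, pvVV d (t.map Prod.fst) k)) := by
            rw [PySem.Dict.items_insert_of_not_contains acc _ hcf, hi, List.map_append]
            have hww : ∀ k ∈ w, (k, pvVV d ((pr :: t).map Prod.fst) k)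
                = (k, pvVV d (t.map Prod.fst) k) := by
              intro k hk
              have hkN : k ≠ "Number" := fun he => hm (h2 ▸ (he ▸ hk))
              simp [pvVV, pvVal, hkN]
            rw [List.map_congr_left hww]
            simp [h2, pvVV, pvVal, hNt]
          rw [hstepA, hstepW, if_neg hm]
          refine ih (pre ++ [pr]) _ (w ++ [pr.1]) (by rw [← hsplit]; simp) hi2
            (by simp only [List.nodup_append]; refine ⟨hw, List.nodup_singleton _, ?_⟩; intro a ha b hb hab; rw [List.mem_singleton] at hb; exact hm ((hab.trans hb) ▸ ha)) (fun h => ?_) (fun h => ?_)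
          · simp only [List.mem_append, List.mem_singleton] at h
            rcases h with h | h
            · simp [hLRw h]
            · exact absurd (h.trans h2) (by decide)
          · exact List.mem_append_right _ (by simp [h2])
      · by_cases h3 : pr.1 = "List[Row]"
        · have hLR_pre : "List[Row]" ∉ pre.map Prod.fst := h3 ▸ hpr_pre
          have hLRnw : pr.1 ∉ w := fun h => hpr_pre (h3 ▸ hLRw (h3 ▸ h))
          have hcf : acc.contains pr.1 = false := by
            rcases Bool.eq_false_or_eq_true (acc.contains pr.1) with h | h
            · exact absurd (hkacc ▸ (PySem.Dict.contains_iff_mem_keys acc pr.1).1 h) hLRnw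
            · exact h
          have hstepA : pvAStep d acc pr = (d.getD pr.1 []).foldl (fun acc2 prod =>
              if d.contains (slotDepKey prod) then
                acc2.insert (slotDepKey prod) (d.getD (slotDepKey prod) []) else acc2)
              (acc.insert pr.1 (d.getD pr.1 [])) := by
            rw [pvAStep, if_neg h1, if_neg (by simp [h2]), if_pos h3]
          have hstepW : pvWStep d w pr = (d.getD pr.1 []).foldl (fun w2 prod =>
              if d.contains (slotDepKey prod) ∧ slotDepKey prod ∉ w2 then w2 ++ [slotDepKey prod]
              else w2) (w ++ [pr.1]) := by
            rw [pvWStep, if_neg ?hno, if_pos h3]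
            case hno => rintro (h | h); exact h1 h; exact h2 h
          have hi1 : (acc.insert pr.1 (d.getD pr.1 [])).items
              = (w ++ [pr.1]).map (fun k => (k, pvVV d (t.map Prod.fst) k)) := by
            rw [PySem.Dict.items_insert_of_not_contains acc _ hcf, hi, List.map_append]
            have hvvt : pvVV d ((pr :: t).map Prod.fst) = pvVV d (t.map Prod.fst) := by
              simp only [List.map_cons]; exact pvVV_cons_ne d h2 _
            rw [hvvt]
            have hLRN : pr.1 ≠ "Number" := h2
            simp [pvVV, pvVal, hLRN]
          have hNumEq : d.contains "Number" = true →
              (∃ q ∈ d.getD "List[Row]" [], slotDepKey q = "Number") →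
              "Number" ∉ t.map Prod.fst → pvNumF d = d.getD "Number" [] := by
            intro hcN hex hNt
            have hNk : "Number" ∈ d.keys := (PySem.Dict.contains_iff_mem_keys d _).1 hcN
            have hNpre : "Number" ∈ pre.map Prod.fst := by
              rw [hkeys] at hNk
              rcases List.mem_append.1 hNk with h | h
              · exact h
              · rcases List.mem_cons.1 h with h | h
                · rw [h3] at h; exact absurd h (by decide)
                · exact absurd h hNt
            have hidx : d.keys.idxOf "Number" < d.keys.idxOf "List[Row]" := by
              rw [hkeys, List.idxOf_append, List.idxOf_append, if_pos hNpre, if_neg hLR_pre]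
              have h0 : List.idxOf "List[Row]" (pr.1 :: t.map Prod.fst) = 0 := by
                rw [h3]; simp
              have hlt : List.idxOf "Number" (pre.map Prod.fst) < (pre.map Prod.fst).length :=
                List.idxOf_lt_length_of_mem hNpre
              omega
            have hcL : d.contains "List[Row]" = true := by
              rw [PySem.Dict.contains_iff_mem_keys, hkeys, ← h3]
              exact List.mem_append_right _ (by simp)
            exact List.filter_eq_self.2 (hD hcN hcL hidx hex)
          have hps : ∀ q ∈ d.getD pr.1 [], q ∈ d.getD "List[Row]" [] := fun q hq => h3 ▸ hq
          have hnw1 : "Number" ∉ w ++ [pr.1] → d.contains "Number" = true →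
              "Number" ∈ t.map Prod.fst := by
            intro h hcN
            have hNw2 : "Number" ∉ w := fun hh => h (by simp [hh])
            have hNpre : "Number" ∉ pre.map Prod.fst := fun hh => hNw2 (hNw hh)
            have hNk : "Number" ∈ d.keys := (PySem.Dict.contains_iff_mem_keys d _).1 hcN
            rw [hkeys] at hNk
            rcases List.mem_append.1 hNk with hh | hh
            · exact absurd hh hNpre
            · rcases List.mem_cons.1 hh with hh | hh
              · exact absurd (by simp [hh]) h
              · exact hh
          obtain ⟨hd1, hd2, hd3⟩ := pv_dep d (t.map Prod.fst) hNumEq (d.getD pr.1 []) hps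
            (acc.insert pr.1 (d.getD pr.1 [])) (w ++ [pr.1]) hi1
            (by simp only [List.nodup_append]; refine ⟨hw, List.nodup_singleton _, ?_⟩; intro a ha b hb hab; rw [List.mem_singleton] at hb; exact hLRnw ((hab.trans hb) ▸ ha)) hnw1
          rw [hstepA, hstepW]
          refine ih (pre ++ [pr]) _ _ (by rw [← hsplit]; simp) hd1 hd2
            (fun _ => by simp [h3]) (fun h => ?_)
          simp only [List.map_append, List.mem_append, List.map_cons, List.map_nil,
            List.mem_singleton] at h
          rcases h with h | h
          · exact hd3 (List.mem_append_left _ (hNw h))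
          · exact absurd (h.trans h3) (by decide)
        · have hstepA : pvAStep d acc pr = acc := by
            rw [pvAStep, if_neg h1, if_neg (by simp [h2]), if_neg h3]
          have hstepW : pvWStep d w pr = w := by
            rw [pvWStep, if_neg ?hno, if_neg h3]
            case hno => rintro (h | h); exact h1 h; exact h2 h
          have hvvt : pvVV d ((pr :: t).map Prod.fst) = pvVV d (t.map Prod.fst) := by
            simp only [List.map_cons]; exact pvVV_cons_ne d h2 _
          rw [hstepA, hstepW]
          refine ih (pre ++ [pr]) acc w (by rw [← hsplit]; simp) (by rw [hi, hvvt]) hw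
            (fun h => by simp [hLRw h]) (fun h => ?_)
          simp only [List.map_append, List.mem_append, List.map_cons, List.map_nil,
            List.mem_singleton] at h
          rcases h with h | h
          · exact hNw h
          · exact absurd h.symm h2


-- ---- tightness: inside D_ the two results differ at the "Number" entry ----

-- A's dependency loop leaves the raw "Number" list whenever some dependency key is "Number"
theorem pv_depA_getDN (d : PySem.Dict String (List String)) (hcN : d.contains "Number" = true) :
    ∀ (ps : List String) (acc : PySem.Dict String (List String)),
      ((∃ p ∈ ps, slotDepKey p = "Number") ∨ acc.getD "Number" [] = d.getD "Number" []) →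
      (ps.foldl (fun acc2 prod =>
          if d.contains (slotDepKey prod) then
            acc2.insert (slotDepKey prod) (d.getD (slotDepKey prod) []) else acc2) acc).getD
        "Number" [] = d.getD "Number" [] := by
  intro ps
  induction ps with
  | nil =>
    intro acc h
    rcases h with ⟨p, hp, _⟩ | h
    · cases hp
    · exact h
  | cons p ps ih =>
    intro acc h
    rw [List.foldl_cons]
    by_cases hpk : slotDepKey p = "Number"
    · apply ih; right
      rw [if_pos (show d.contains (slotDepKey p) = true by rw [hpk]; exact hcN), hpk,
        PySem.Dict.getD_insert_self]
    · apply ih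
      rcases h with ⟨q, hq, hqk⟩ | h
      · rcases List.mem_cons.1 hq with hq | hq
        · exact absurd (hq ▸ hqk) hpk
        · exact Or.inl ⟨q, hq, hqk⟩
      · right
        split_ifs with hc2
        · rw [PySem.Dict.getD_insert_of_ne _ _ _ (fun he : (("Number":String)) = slotDepKey p => hpk he.symm)]; exact h
        · exact h

-- steps at keys other than "Number"/"List[Row]" preserve the "Number" entry
theorem pv_A_preserveN (d : PySem.Dict String (List String)) :
    ∀ (l : List (String × List String)) (acc : PySem.Dict String (List String)),
      "Number" ∉ l.map Prod.fst → "List[Row]" ∉ l.map Prod.fst →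
      (l.foldl (pvAStep d) acc).getD "Number" [] = acc.getD "Number" [] := by
  intro l
  induction l with
  | nil => intro acc _ _; rfl
  | cons pr t ih =>
    intro acc hN hL
    simp only [List.map_cons, List.mem_cons, not_or] at hN hL
    rw [List.foldl_cons, ih _ hN.2 hL.2]
    rw [pvAStep]
    split_ifs with c1 c2 c3
    · exact PySem.Dict.getD_insert_of_ne _ _ _ (fun he => hN.1 he)
    · have hc2' : pr.1 = "Number" := by simpa using c2
      exact absurd hc2'.symm hN.1
    · exact absurd c3.symm hL.1
    · rfl

theorem pv_depw_mono (d : PySem.Dict String (List String)) :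
    ∀ (ps : List String) (w2 : List String),
      w2 ⊆ ps.foldl (fun w2 prod =>
        if d.contains (slotDepKey prod) ∧ slotDepKey prod ∉ w2 then w2 ++ [slotDepKey prod]
        else w2) w2 := by
  intro ps
  induction ps with
  | nil => intro w2; exact fun a ha => ha
  | cons p ps ih =>
    intro w2
    rw [List.foldl_cons]
    refine List.Subset.trans ?_ (ih _)
    split_ifs
    · exact List.subset_append_left _ _
    · exact fun a ha => ha

theorem pv_wstep_mono (d : PySem.Dict String (List String)) (w : List String)
    (pr : String × List String) : w ⊆ pvWStep d w pr := by
  rw [pvWStep]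
  split_ifs with c1 c2 c3
  · exact fun a ha => ha
  · exact List.subset_append_left _ _
  · exact List.Subset.trans (List.subset_append_left _ _) (pv_depw_mono d _ _)
  · exact fun a ha => ha

theorem pv_memN_fold (d : PySem.Dict String (List String)) :
    ∀ (l : List (String × List String)) (w : List String),
      ("Number" ∈ l.map Prod.fst ∨ "Number" ∈ w) → "Number" ∈ l.foldl (pvWStep d) w := by
  intro l
  induction l with
  | nil =>
    intro w h
    rcases h with h | h
    · cases h
    · exact h
  | cons pr t ih =>
    intro w h
    rw [List.foldl_cons]
    apply ih
    rcases h with h | h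
    · rcases List.mem_cons.1 h with h | h
      · right
        rw [pvWStep, if_pos (Or.inr h.symm)]
        split_ifs with hm
        · exact h ▸ hm
        · exact List.mem_append_right _ (by simp [h])
      · exact Or.inl h
    · exact Or.inr (pv_wstep_mono d w pr h)

theorem pv_getD_fold_val_pres (d : PySem.Dict String (List String)) :
    ∀ (w : List String) (acc : PySem.Dict String (List String)), "Number" ∉ w →
      (w.foldl (fun out nt => out.insert nt (pvVal d nt)) acc).getD "Number" []
        = acc.getD "Number" [] := by
  intro w
  induction w with
  | nil => intro acc _; rfl
  | cons nt rest ih =>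
    intro acc h
    simp only [List.mem_cons, not_or] at h
    rw [List.foldl_cons, ih _ h.2, PySem.Dict.getD_insert_of_ne _ _ _ (fun he => h.1 he)]

theorem pv_getD_fold_val (d : PySem.Dict String (List String)) :
    ∀ (w : List String) (acc : PySem.Dict String (List String)), "Number" ∈ w →
      (w.foldl (fun out nt => out.insert nt (pvVal d nt)) acc).getD "Number" [] = pvNumF d := by
  intro w
  induction w with
  | nil => intro acc h; cases h
  | cons nt rest ih =>
    intro acc h
    rw [List.foldl_cons]
    by_cases hr : "Number" ∈ rest
    · exact ih _ hr
    · rcases List.mem_cons.1 h with h | h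
      · rw [pv_getD_fold_val_pres d rest _ hr, ← h, PySem.Dict.getD_insert_self, pvVal, if_pos rfl]
      · exact absurd h hr

theorem pv_bstep_eq (d : PySem.Dict String (List String)) :
    (fun (out : PySem.Dict String (List String)) (nt : String) =>
      if nt = "Number" then
        out.insert nt ((d.getD nt []).filter (fun p => pvFloatOk (slotRhs p)))
      else out.insert nt (d.getD nt []))
    = fun (out : PySem.Dict String (List String)) (nt : String) =>
        out.insert nt (pvVal d nt) := by
  funext out nt
  by_cases h : nt = "Number" <;> simp [h, pvVal, pvNumF]

theorem pv_wanted_eq (d : PySem.Dict String (List String)) :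
    slotWanted d = d.items.foldl (pvWStep d) [] := by
  show (d.items.map Prod.fst).foldl _ [] = _
  rw [List.foldl_map]
  rfl

theorem pv_alt_eq (actions : List (String × List String)) :
    get_slot_productions_py_alt actions
      = ((slotWanted (PySem.Dict.ofList actions)).foldl
          (fun out nt => out.insert nt (pvVal (PySem.Dict.ofList actions) nt))
          PySem.Dict.empty).items := by
  show ((slotWanted (PySem.Dict.ofList actions)).foldl
      (fun (out : PySem.Dict String (List String)) (nt : String) =>
        if nt = "Number" then
          out.insert nt (((PySem.Dict.ofList actions).getD nt []).filter
            (fun p => pvFloatOk (slotRhs p)))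
        else out.insert nt ((PySem.Dict.ofList actions).getD nt [])) PySem.Dict.empty).items = _
  rw [pv_bstep_eq]

-- ===== VERDICT (by name: the statement is the Claim_ definition above) =====
theorem get_slot_productions_py_spec : Claim_unchanged_get_slot_productions_py := by
  intro actions _ _ hnD
  have hnd : (PySem.Dict.ofList actions).keys.Nodup := PySem.Dict.nodup_keys_ofList actions
  have hD : (PySem.Dict.ofList actions).contains "Number" = true →
      (PySem.Dict.ofList actions).contains "List[Row]" = true →
      (PySem.Dict.ofList actions).keys.idxOf "Number"
        < (PySem.Dict.ofList actions).keys.idxOf "List[Row]" →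
      (∃ p ∈ (PySem.Dict.ofList actions).getD "List[Row]" [], slotDepKey p = "Number") →
      ∀ p ∈ (PySem.Dict.ofList actions).getD "Number" [], pvFloatOk (slotRhs p) = true := by
    intro hc1 hc2 hc3 hc4 p hp
    by_contra hf
    refine hnD ⟨hc1, hc2, hc3, hc4, p, hp, ?_⟩
    revert hf; cases pvFloatOk (slotRhs p) <;> simp
  obtain ⟨hitems, hWnd⟩ := pv_outer (PySem.Dict.ofList actions) hnd hD
    (PySem.Dict.ofList actions).items [] PySem.Dict.empty [] rfl (by rw [List.map_nil]; rfl) List.nodup_nil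
    (by simp) (by simp)
  show get_slot_productions_py actions = get_slot_productions_py_alt actions
  have e1 : get_slot_productions_py actions
      = ((PySem.Dict.ofList actions).items.foldl (pvAStep (PySem.Dict.ofList actions))
          PySem.Dict.empty).items := rfl
  have eW : slotWanted (PySem.Dict.ofList actions)
      = (PySem.Dict.ofList actions).items.foldl (pvWStep (PySem.Dict.ofList actions)) [] := by
    show ((PySem.Dict.ofList actions).items.map Prod.fst).foldl _ [] = _
    rw [List.foldl_map]
    rfl
  have e2 : get_slot_productions_py_alt actions
      = (((PySem.Dict.ofList actions).items.foldl (pvWStep (PySem.Dict.ofList actions)) []).foldl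
          (fun out nt =>
            if nt = "Number" then
              out.insert nt (((PySem.Dict.ofList actions).getD nt []).filter
                (fun p => pvFloatOk (slotRhs p)))
            else out.insert nt ((PySem.Dict.ofList actions).getD nt []))
          PySem.Dict.empty).items := by
    rw [get_slot_productions_py_alt, eW]
  rw [e1, e2, hitems]
  have hfun : (fun (out : PySem.Dict String (List String)) (nt : String) =>
      if nt = "Number" then
        out.insert nt (((PySem.Dict.ofList actions).getD nt []).filter
          (fun p => pvFloatOk (slotRhs p)))
      else out.insert nt ((PySem.Dict.ofList actions).getD nt []))
      = (fun (out : PySem.Dict String (List String)) (nt : String) =>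
          out.insert nt (pvVal (PySem.Dict.ofList actions) nt)) := by
    funext out nt
    by_cases h : nt = "Number" <;> simp [h, pvVal, pvNumF]
  rw [hfun, PySem.Dict.items_foldl_insert_fresh _ (fun nt => nt)
    (fun nt => pvVal (PySem.Dict.ofList actions) nt) PySem.Dict.empty
    (fun a _ => PySem.Dict.contains_empty a) (by simpa using hWnd)]
  have he : (PySem.Dict.empty : PySem.Dict String (List String)).items = [] := rfl
  rw [he, List.nil_append]

theorem get_slot_productions_py_changed : Claim_changed_get_slot_productions_py := by
  unfold Claim_changed_get_slot_productions_py; decide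

theorem get_slot_productions_py_tight : Claim_exact_get_slot_productions_py := by
  intro actions _ _ hD h
  obtain ⟨hcN, hcL, hidx, hdep, p0, hp0, hflt⟩ := hD
  have hnd : (PySem.Dict.ofList actions).keys.Nodup := PySem.Dict.nodup_keys_ofList actions
  have hne : pvNumF (PySem.Dict.ofList actions)
      ≠ (PySem.Dict.ofList actions).getD "Number" [] := by
    intro he
    have := List.filter_eq_self.1 he p0 hp0
    rw [hflt] at this
    cases this
  -- split the items at the "List[Row]" entry
  have hLRk : "List[Row]" ∈ (PySem.Dict.ofList actions).keys :=
    (PySem.Dict.contains_iff_mem_keys _ _).1 hcL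
  obtain ⟨pr0, hpr0, hpr0k⟩ := List.mem_map.1 (show "List[Row]"
      ∈ (PySem.Dict.ofList actions).items.map Prod.fst from hLRk)
  obtain ⟨v, hv⟩ : ∃ v, ("List[Row]", v) ∈ (PySem.Dict.ofList actions).items :=
    ⟨pr0.2, by rw [← hpr0k]; exact hpr0⟩
  obtain ⟨pre, t, hsplit⟩ := List.append_of_mem hv
  have hkeys : (PySem.Dict.ofList actions).keys
      = pre.map Prod.fst ++ "List[Row]" :: t.map Prod.fst := by
    show (PySem.Dict.ofList actions).items.map Prod.fst = _
    rw [hsplit]; simp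
  have hndk := hnd
  rw [hkeys, List.nodup_append] at hndk
  have hLRpre : "List[Row]" ∉ pre.map Prod.fst :=
    fun hh => hndk.2.2 _ hh _ (by simp) rfl
  have hidxLR : (PySem.Dict.ofList actions).keys.idxOf "List[Row]"
      = (pre.map Prod.fst).length := by
    rw [hkeys, List.idxOf_append, if_neg hLRpre]; simp
  have hNpre : "Number" ∈ pre.map Prod.fst := by
    by_contra hn
    have h2 : (pre.map Prod.fst).length ≤ (PySem.Dict.ofList actions).keys.idxOf "Number" := by
      rw [hkeys, List.idxOf_append, if_neg hn]; omega
    omega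
  have hNnt : "Number" ∉ "List[Row]" :: t.map Prod.fst :=
    fun hh => hndk.2.2 _ hNpre _ hh rfl
  have hNt : "Number" ∉ t.map Prod.fst := fun hh => hNnt (by simp [hh])
  have hLRt : "List[Row]" ∉ t.map Prod.fst := (List.nodup_cons.mp hndk.2.1).1
  have hgv : (PySem.Dict.ofList actions).getD "List[Row]" [] = v :=
    PySem.Dict.getD_of_mem_items _ hv hnd []
  -- A's final "Number" entry is the raw list
  have hLRstep : pvAStep (PySem.Dict.ofList actions)
      (pre.foldl (pvAStep (PySem.Dict.ofList actions)) PySem.Dict.empty) ("List[Row]", v)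
      = ((PySem.Dict.ofList actions).getD "List[Row]" []).foldl (fun acc2 prod =>
          if (PySem.Dict.ofList actions).contains (slotDepKey prod) then
            acc2.insert (slotDepKey prod) ((PySem.Dict.ofList actions).getD (slotDepKey prod) [])
          else acc2)
          ((pre.foldl (pvAStep (PySem.Dict.ofList actions)) PySem.Dict.empty).insert "List[Row]"
            ((PySem.Dict.ofList actions).getD "List[Row]" [])) := by
    rw [pvAStep]
    dsimp only
    rw [if_neg (by decide), if_neg (by decide), if_pos rfl]
  have hAgetD : ((PySem.Dict.ofList actions).items.foldl (pvAStep (PySem.Dict.ofList actions))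
      PySem.Dict.empty).getD "Number" [] = (PySem.Dict.ofList actions).getD "Number" [] := by
    rw [hsplit, List.foldl_append, List.foldl_cons, pv_A_preserveN _ t _ hNt hLRt, hLRstep]
    exact pv_depA_getDN (PySem.Dict.ofList actions) hcN _ _ (Or.inl hdep)
  -- B's final "Number" entry is the filtered list
  have hBmemW : "Number" ∈ slotWanted (PySem.Dict.ofList actions) := by
    rw [pv_wanted_eq]
    exact pv_memN_fold _ _ []
      (Or.inl (show "Number" ∈ (PySem.Dict.ofList actions).items.map Prod.fst from
        (PySem.Dict.contains_iff_mem_keys _ _).1 hcN))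
  have hBgetD : ((slotWanted (PySem.Dict.ofList actions)).foldl
      (fun out nt => out.insert nt (pvVal (PySem.Dict.ofList actions) nt))
      PySem.Dict.empty).getD "Number" [] = pvNumF (PySem.Dict.ofList actions) :=
    pv_getD_fold_val _ _ _ hBmemW
  -- combine: equal item lists would force equal "Number" entries
  have hA : get_slot_productions_py actions
      = ((PySem.Dict.ofList actions).items.foldl (pvAStep (PySem.Dict.ofList actions))
          PySem.Dict.empty).items := rfl
  rw [hA, pv_alt_eq actions] at h
  have hde := PySem.Dict.ext h
  have hgd := congrArg (fun dd : PySem.Dict String (List String) => dd.getD "Number" []) hde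
  simp only at hgd
  rw [hAgetD, hBgetD] at hgd
  exact hne hgd.symm
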